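-- pv_equiv track=rewrite | github.com/KotOnBoard/rf_discharge_calc | back/scanner_back_11-09-25.py | PairFinder
-- ===== SOURCE A (Python) =====
-- def PairFinder(iter_par):
--     keys = list(iter_par.keys())
--     pairs={}
--     for i, val in enumerate(iter_par.values()):
--         length = len(val)
--         if length not in pairs and length>1:
--             pairs[length] = []
--         if length>1:
--             pairs[length].append(keys[i])
--     for key in list(pairs):
--         if len(pairs[key])<2: pairs.pop(key)
--     return pairs
-- ===== SOURCE B (Python) =====
-- def PairFinder(iter_par):
--     lengths = [len(v) for v in iter_par.values()]
--     out = {}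
--     for key, L in zip(iter_par.keys(), lengths):
--         if L > 1 and lengths.count(L) >= 2:
--             out.setdefault(L, []).append(key)
--     return out
-- ===== Notes on version B (the rewrite author's own statement) =====
-- stated objective: simpler
-- what changed: B replaces A's build-then-prune two-dict-pass strategy (insert empty buckets, append, then delete singleton buckets) with a precomputed list of value-lengths whose count decides membership up front, so buckets are built once in a single filtered pass and nothing is ever deleted.
import Mathlib
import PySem

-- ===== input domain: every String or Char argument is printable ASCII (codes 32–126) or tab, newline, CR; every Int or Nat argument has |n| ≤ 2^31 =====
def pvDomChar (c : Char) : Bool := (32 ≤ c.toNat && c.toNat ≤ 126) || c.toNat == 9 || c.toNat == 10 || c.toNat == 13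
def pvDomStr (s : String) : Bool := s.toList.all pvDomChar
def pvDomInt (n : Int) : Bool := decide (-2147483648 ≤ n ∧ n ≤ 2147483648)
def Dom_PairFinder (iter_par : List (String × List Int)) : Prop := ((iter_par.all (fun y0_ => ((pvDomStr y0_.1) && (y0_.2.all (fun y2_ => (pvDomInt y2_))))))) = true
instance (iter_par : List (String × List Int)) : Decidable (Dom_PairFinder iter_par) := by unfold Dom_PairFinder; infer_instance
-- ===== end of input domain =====

-- B replaces A's build-then-prune strategy with one filtered grouping pass decided by a
-- precomputed length list; equal return value is proved (B is not claimed faster).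

-- ===== PORT A =====
-- keys = list(iter_par.keys()); for i, val in enumerate(iter_par.values()): … ; prune pass; return pairs
def PairFinder (iter_par : List (String × List Int)) : List (Int × List String) :=
  let keys : List String := iter_par.map (fun p => p.1)
  let pairs : PySem.Dict Int (List String) :=
    (PySem.List.enumerate (iter_par.map (fun p => p.2))).foldl
      (fun pairs iv =>
        let length : Int := (iv.2.length : Int)
        -- if length not in pairs and length>1: pairs[length] = []
        let pairs :=
          if !pairs.contains length && decide (1 < length) then
            pairs.insert length ([] : List String)
          else pairs
        -- if length>1: pairs[length].append(keys[i])   (pairs[length] exists here: just inserted)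
        if decide (1 < length) then
          pairs.modify length [] (fun l => l ++ [(PySem.List.pyGet? keys iv.1).getD ""])
        else pairs)
      PySem.Dict.empty
  -- for key in list(pairs): if len(pairs[key])<2: pairs.pop(key)   (key is present: pairs[key] / pop cannot raise)
  let pairs :=
    pairs.keys.foldl
      (fun d key =>
        if (d.getD key []).length < 2 then
          match d.pop? key with
          | some (_, d') => d'
          | none => d
        else d)
      pairs
  pairs.items

-- ===== PORT B =====
-- lengths = [len(v) for v in iter_par.values()]; single filtered grouping pass; return out
def PairFinder_alt (iter_par : List (String × List Int)) : List (Int × List String) :=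
  let lengths : List Int := iter_par.map (fun p => (p.2.length : Int))
  let out : PySem.Dict Int (List String) :=
    ((iter_par.map (fun p => p.1)).zip lengths).foldl
      (fun d kl =>
        if decide (1 < kl.2) && decide (2 ≤ PySem.List.count lengths kl.2) then
          -- out.setdefault(L, []).append(key)  ==  d[L] = d.get(L, []) + [key]
          d.modify kl.2 [] (fun l => l ++ [kl.1])
        else d)
      PySem.Dict.empty
  out.items

-- ===== PRECONDITION & SPEC =====
-- iter_par models a Python dict, whose keys are necessarily distinct; assoc lists with a
-- duplicated key represent no Python input, so they are excluded.
def Pre_PairFinder (iter_par : List (String × List Int)) : Prop :=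
  (iter_par.map (fun p => p.1)).Nodup
instance (iter_par : List (String × List Int)) : Decidable (Pre_PairFinder iter_par) := by
  unfold Pre_PairFinder; infer_instance
def pvWitness_PairFinder : (List (String × List Int)) :=
  [("a", [1, 2]), ("b", [3, 4]), ("c", [5])]

def Spec_PairFinder (iter_par : List (String × List Int)) (out : List (Int × List String)) : Prop := out = PairFinder_alt iter_par
instance (iter_par : List (String × List Int)) (out : List (Int × List String)) : Decidable (Spec_PairFinder iter_par out) := by unfold Spec_PairFinder; infer_instance

-- ===== CLAIM (what is proved, stated in full; the proofs are below) =====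
def Claim_equal_PairFinder : Prop := ∀ (iter_par : List (String × List Int)), Dom_PairFinder iter_par → Pre_PairFinder iter_par → Spec_PairFinder iter_par (PairFinder iter_par)

-- ===== LEMMAS AND PROOFS =====

lemma collapse (d : PySem.Dict Int (List String)) (k : Int) (f : List String → List String)
    (hc : d.contains k = false) :
    (d.insert k ([] : List String)).modify k [] f = d.modify k [] f := by
  simp [PySem.Dict.modify, PySem.Dict.insert_insert_self, PySem.Dict.getD_insert_self,
    PySem.Dict.getD_of_not_contains (h := hc)]

-- step of A's first loop equals a guarded modify
lemma stepA_eq (d : PySem.Dict Int (List String)) (val : List Int) (f : List String → List String) :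
    (let length : Int := (val.length : Int)
     let d1 := if !d.contains length && decide (1 < length) then d.insert length ([] : List String) else d
     if decide (1 < length) then d1.modify length [] f else d1)
    = (if decide (1 < (val.length : Int)) then d.modify (val.length : Int) [] f else d) := by
  by_cases hL : (1 : Int) < (val.length : Int)
  · rcases Bool.eq_false_or_eq_true (d.contains (val.length : Int)) with hc | hc
    · simp [hL, hc]
    · simp [hL, hc, collapse _ _ _ hc]
  · simp [hL]

-- fold over enumerate with pyGet? keys = fold over zip
lemma enum_zip (F : PySem.Dict Int (List String) → String → List Int → PySem.Dict Int (List String)) :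
    ∀ (V : List (List Int)) (Kpre Ksuf : List String) (d : PySem.Dict Int (List String)),
      Ksuf.length = V.length →
      (PySem.List.enumerate V (Kpre.length : Int)).foldl
        (fun d iv => F d ((PySem.List.pyGet? (Kpre ++ Ksuf) iv.1).getD "") iv.2) d
      = (Ksuf.zip V).foldl (fun d kv => F d kv.1 kv.2) d := by
  intro V
  induction V with
  | nil => intro Kpre Ksuf d h; simp [PySem.List.enumerate]
  | cons v V ih =>
    intro Kpre Ksuf d h
    match Ksuf with
    | [] => simp at h
    | k :: Ks =>
      simp only [PySem.List.enumerate_cons, List.foldl_cons, List.zip_cons_cons]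
      have h1 : PySem.List.pyGet? (Kpre ++ k :: Ks) ((Kpre.length : Int)) = some k := by
        rw [PySem.List.pyGet?_natCast]
        simp
      rw [h1]
      simp only [Option.getD_some]
      have h2 : ((Kpre.length : Int) + 1) = (((Kpre ++ [k]).length : Nat) : Int) := by simp
      have h3 : Kpre ++ k :: Ks = (Kpre ++ [k]) ++ Ks := by simp
      rw [h2, h3, ih (Kpre ++ [k]) Ks _ (by simpa using h)]

-- the body of A's prune loop is an erase
lemma popStep_eq (d : PySem.Dict Int (List String)) (k : Int) :
    (if (d.getD k []).length < 2 then
      match d.pop? k with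
      | some (_, d') => d'
      | none => d
     else d)
    = (if (d.getD k []).length < 2 then d.erase k else d) := by
  by_cases h : (d.getD k []).length < 2
  · simp only [h, if_pos]
    cases hg : d.get? k with
    | none =>
      simp only [PySem.Dict.pop?, hg, Option.map_none]
      apply PySem.Dict.ext
      simp only [PySem.Dict.erase]
      rw [List.filter_eq_self.mpr]
      intro p hp
      have hmem : p.1 ∈ d.keys := PySem.Dict.mem_keys_of_mem_items _ hp
      by_contra hb
      simp only [Bool.not_eq_true', Bool.not_eq_false] at hb
      have hpk : p.1 = k := by exact_mod_cast of_decide_eq_true (by simpa using hb)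
      rw [hpk] at hmem
      rw [PySem.Dict.get?_eq_none_iff_not_mem_keys] at hg
      exact hg hmem
    | some v => simp [PySem.Dict.pop?, hg]
  · simp [h]

lemma nodup_keys_erase (d : PySem.Dict Int (List String)) (k : Int) (h : d.keys.Nodup) :
    (d.erase k).keys.Nodup := by
  simp only [PySem.Dict.keys, PySem.Dict.erase] at *
  exact (List.Sublist.map _ (List.filter_sublist)).nodup h

-- A's prune loop filters the items
lemma prune_filter :
    ∀ (ks : List Int) (d : PySem.Dict Int (List String)), d.keys.Nodup →
      (ks.foldl (fun d key => if (d.getD key []).length < 2 then d.erase key else d) d).items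
      = d.items.filter (fun p => !(decide (p.1 ∈ ks) && decide (p.2.length < 2))) := by
  intro ks
  induction ks with
  | nil => intro d hnd; simp
  | cons k ks ih =>
    intro d hnd
    simp only [List.foldl_cons]
    by_cases h : (d.getD k []).length < 2
    · rw [if_pos h, ih _ (nodup_keys_erase _ _ hnd)]
      show (List.filter _ d.items).filter _ = _
      rw [List.filter_filter]
      apply List.filter_congr
      intro p hp
      by_cases hpk : p.1 = k
      · have hv : p.2.length < 2 := by
          have := PySem.Dict.getD_of_mem_items d (k := p.1) (v := p.2) (by simpa using hp) hnd []
          rw [hpk] at this; rw [this] at h; exact h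
        simp [hpk, hv]
      · simp [hpk]
    · rw [if_neg h, ih _ hnd]
      apply List.filter_congr
      intro p hp
      by_cases hpk : p.1 = k
      · have hv : ¬ p.2.length < 2 := by
          have := PySem.Dict.getD_of_mem_items d (k := p.1) (v := p.2) (by simpa using hp) hnd []
          rw [hpk] at this; rw [this] at h; exact h
        simp [hpk, hv]
      · simp [hpk]

-- key facts between a dict and its key-filtered companion
lemma nodup_keys_filterB (dA dB : PySem.Dict Int (List String)) (c : Int → Bool)
    (hB : dB.items = dA.items.filter (fun p => c p.1)) (hnd : dA.keys.Nodup) :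
    dB.keys.Nodup := by
  simp only [PySem.Dict.keys, hB] at *
  exact (List.Sublist.map _ (List.filter_sublist)).nodup hnd

lemma mem_keys_filterB (dA dB : PySem.Dict Int (List String)) (c : Int → Bool)
    (hB : dB.items = dA.items.filter (fun p => c p.1))
    (L : Int) (hcL : c L = true) : L ∈ dB.keys ↔ L ∈ dA.keys := by
  simp only [PySem.Dict.keys, hB, List.mem_map, List.mem_filter]
  constructor
  · rintro ⟨p, ⟨hp, _⟩, rfl⟩; exact ⟨p, hp, rfl⟩
  · rintro ⟨p, hp, rfl⟩; exact ⟨p, ⟨hp, hcL⟩, rfl⟩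

lemma contains_filterB (dA dB : PySem.Dict Int (List String)) (c : Int → Bool)
    (hB : dB.items = dA.items.filter (fun p => c p.1))
    (L : Int) (hcL : c L = true) : dB.contains L = dA.contains L := by
  rw [PySem.Dict.contains_eq_decide_mem_keys, PySem.Dict.contains_eq_decide_mem_keys]
  simp [mem_keys_filterB dA dB c hB L hcL]

lemma getD_filterB (dA dB : PySem.Dict Int (List String)) (c : Int → Bool)
    (hB : dB.items = dA.items.filter (fun p => c p.1)) (hnd : dA.keys.Nodup)
    (L : Int) (hcL : c L = true) : dB.getD L [] = dA.getD L [] := by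
  cases hA : dA.get? L with
  | some v =>
    have hmemA : (L, v) ∈ dA.items := PySem.Dict.mem_items_of_get?_eq_some _ hA
    have hmemB : (L, v) ∈ dB.items := by
      rw [hB, List.mem_filter]; exact ⟨hmemA, hcL⟩
    rw [PySem.Dict.getD_of_mem_items _ hmemB (nodup_keys_filterB dA dB c hB hnd),
        PySem.Dict.getD_of_mem_items _ hmemA hnd]
  | none =>
    rw [PySem.Dict.get?_eq_none_iff_not_mem_keys] at hA
    have hBn : ¬ L ∈ dB.keys := fun h => hA ((mem_keys_filterB dA dB c hB L hcL).1 h)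
    rw [PySem.Dict.getD_of_not_contains, PySem.Dict.getD_of_not_contains]
    · rw [PySem.Dict.contains_eq_decide_mem_keys]; simpa using hA
    · rw [PySem.Dict.contains_eq_decide_mem_keys]; simpa using hBn

-- B's guarded fold is the c-key-filter of A's guarded fold
lemma filt_fold (c : Int → Bool) :
    ∀ (l : List (String × Int)) (dA dB : PySem.Dict Int (List String)),
      dA.keys.Nodup → dB.items = dA.items.filter (fun p => c p.1) →
      (l.foldl (fun d kl => if decide (1 < kl.2) && c kl.2 then d.modify kl.2 [] (fun v => v ++ [kl.1]) else d) dB).items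
      = (l.foldl (fun d kl => if decide (1 < kl.2) then d.modify kl.2 [] (fun v => v ++ [kl.1]) else d) dA).items.filter (fun p => c p.1) := by
  intro l
  induction l with
  | nil => intro dA dB hnd hB; simpa using hB
  | cons kl l ih =>
    intro dA dB hnd hB
    obtain ⟨k, L⟩ := kl
    simp only [List.foldl_cons]
    by_cases hL : (1 : Int) < L
    · by_cases hc : c L = true
      · simp only [hL, hc, decide_true, Bool.and_true, if_pos]
        have hnd' : (dA.modify L [] (fun v => v ++ [k])).keys.Nodup := by
          simp only [PySem.Dict.modify]
          exact PySem.Dict.nodup_keys_insert _ _ _ hnd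
        apply ih _ _ hnd'
        -- new invariant after both modify
        have hg : dB.getD L [] = dA.getD L [] := getD_filterB dA dB c hB hnd L hc
        simp only [PySem.Dict.modify, hg]
        rcases Bool.eq_false_or_eq_true (dA.contains L) with hcont | hcont
        · have hcB : dB.contains L = true := by rw [contains_filterB dA dB c hB L hc]; exact hcont
          rw [PySem.Dict.items_insert_of_contains _ _ hcB,
              PySem.Dict.items_insert_of_contains _ _ hcont, hB,
              List.filter_map]
          congr 1
          apply List.filter_congr
          intro p hp
          by_cases hpk : p.1 = L <;> simp [Function.comp, hpk, hc]
        · have hcB : dB.contains L = false := by rw [contains_filterB dA dB c hB L hc]; exact hcont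
          rw [PySem.Dict.items_insert_of_not_contains _ _ hcB,
              PySem.Dict.items_insert_of_not_contains _ _ hcont,
              List.filter_append, hB]
          simp [hc]
      · have hc' : c L = false := by simpa using hc
        simp only [hL, hc', decide_true, Bool.and_false, if_neg, Bool.false_eq_true,
          not_false_eq_true, if_pos]
        have hnd' : (dA.modify L [] (fun v => v ++ [k])).keys.Nodup := by
          simp only [PySem.Dict.modify]
          exact PySem.Dict.nodup_keys_insert _ _ _ hnd
        apply ih _ _ hnd'
        simp only [PySem.Dict.modify]
        rcases Bool.eq_false_or_eq_true (dA.contains L) with hcont | hcont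
        · rw [PySem.Dict.items_insert_of_contains _ _ hcont, List.filter_map, hB]
          have h1 : ∀ p ∈ dA.items, ((fun p => c p.1) ∘ (fun p => if (p.1 == L) = true then (L, (dA.getD L [] ++ [k])) else p)) p = c p.1 := by
            intro p hp
            by_cases hpk : p.1 = L <;> simp [Function.comp, hpk, hc']
          rw [List.filter_congr h1]
          have h2 : ∀ p ∈ List.filter (fun x => c x.1) dA.items,
              (fun p => if (p.1 == L) = true then (L, dA.getD L [] ++ [k]) else p) p = id p := by
            intro p hp
            have hpne : p.1 ≠ L := by
              intro he
              have := (List.mem_filter.mp hp).2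
              rw [he, hc'] at this
              exact Bool.false_ne_true this
            simp [hpne]
          rw [List.map_congr_left h2, List.map_id]
        · rw [PySem.Dict.items_insert_of_not_contains _ _ hcont, List.filter_append, hB]
          simp [hc']
    · simp only [hL, decide_false, Bool.false_and, Bool.false_eq_true, not_false_eq_true,
        if_neg]
      exact ih dA dB hnd hB

lemma mem_set_update_iff (s : PySem.Set Int) (xs : List Int) (y : Int) :
    y ∈ PySem.Set.update s xs ↔ y ∈ s ∨ y ∈ xs := by
  unfold PySem.Set.update
  induction xs generalizing s with
  | nil => simp
  | cons x xs ih =>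
    simp only [List.foldl_cons, ih, PySem.Set.mem_add]
    constructor
    · rintro (h | h) <;> simp_all
      tauto
    · intro h; simp_all; tauto

-- characterization of A's grouping fold: keys are lengths > 1, buckets have size countP
lemma gA_mem (l : List (String × Int)) (p : Int × List String)
    (hp : p ∈ (l.foldl (fun d kl => if decide (1 < kl.2) then d.modify kl.2 [] (fun v => v ++ [kl.1]) else d) PySem.Dict.empty).items) :
    1 < p.1 ∧ p.2.length = l.countP (fun kl => kl.2 == p.1) := by
  rw [← List.foldl_filter] at hp
  set M := (l.filter (fun kl => decide (1 < kl.2))).map (fun kl => (kl.2, kl.1)) with hM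
  have hconv : List.foldl (fun (d : PySem.Dict Int (List String)) (r : Int × String) => d.modify r.1 [] (fun v => v ++ [r.2])) PySem.Dict.empty M
      = List.foldl (fun (d : PySem.Dict Int (List String)) (kl : String × Int) => d.modify kl.2 [] (fun v => v ++ [kl.1])) PySem.Dict.empty (l.filter (fun kl => decide (1 < kl.2))) := by
    rw [hM, List.foldl_map]
  rw [← hconv] at hp
  have hnd : (M.foldl (fun (d : PySem.Dict Int (List String)) r => d.modify r.1 [] (fun v => v ++ [r.2])) PySem.Dict.empty).keys.Nodup :=
    PySem.Dict.nodup_keys_foldl_modify_key M Prod.fst [] (fun _ r v => v ++ [r.2]) _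
      (by simp [PySem.Dict.empty])
  have hkeys : p.1 ∈ M.map Prod.fst := by
    have h1 := PySem.Dict.mem_keys_of_mem_items _ hp
    rw [PySem.Dict.keys_foldl_modify_key M Prod.fst [] (fun _ r v => v ++ [r.2])] at h1
    rcases (mem_set_update_iff _ _ _).1 h1 with h | h
    · simp [PySem.Dict.keys_empty] at h
    · exact h
  have hgt : 1 < p.1 := by
    rw [hM] at hkeys
    simp only [List.map_map, List.mem_map, List.mem_filter, Function.comp] at hkeys
    obtain ⟨kl, ⟨_, hq⟩, hk⟩ := hkeys
    rw [← hk]; exact of_decide_eq_true hq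
  refine ⟨hgt, ?_⟩
  have hval : p.2 = (M.filter (fun r => r.1 == p.1)).map (fun r => r.2) := by
    obtain ⟨L, v⟩ := p
    have := PySem.Dict.getD_of_mem_items _ hp hnd []
    rw [PySem.Dict.getD_foldl_modify_append] at this
    simpa using this.symm
  rw [hval, List.length_map, ← List.countP_eq_length_filter, hM]
  rw [List.countP_map, List.countP_filter]
  apply List.countP_congr
  intro kl _
  simp only [Function.comp]
  by_cases hkl : kl.2 = p.1
  · simp [hkl, hgt]
  · simp [hkl]


-- ===== VERDICT (by name: the statement is the Claim_ definition above) =====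
theorem PairFinder_spec : Claim_equal_PairFinder := by
  intro iter_par _ _
  unfold Spec_PairFinder
  simp only [PairFinder, PairFinder_alt]
  set K := List.map (fun (p : String × List Int) => p.1) iter_par with hK
  set lengths := List.map (fun (p : String × List Int) => ((p.2.length : Nat) : Int)) iter_par with hlen
  -- A's first loop: enumerate+insert+append = one guarded grouping fold over (key, length) pairs
  have hb : (fun (pairs : PySem.Dict Int (List String)) (iv : Int × List Int) =>
        if decide (1 < (iv.2.length : Int)) = true then
          (if (!pairs.contains (iv.2.length : Int) && decide (1 < (iv.2.length : Int))) = true then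
              pairs.insert (iv.2.length : Int) [] else pairs).modify
            (iv.2.length : Int) [] fun l => l ++ [(PySem.List.pyGet? K iv.1).getD ""]
        else
          if (!pairs.contains (iv.2.length : Int) && decide (1 < (iv.2.length : Int))) = true then
            pairs.insert (iv.2.length : Int) [] else pairs)
      = fun pairs iv => if decide (1 < (iv.2.length : Int)) = true then
          pairs.modify (iv.2.length : Int) [] (fun l => l ++ [(PySem.List.pyGet? K iv.1).getD ""]) else pairs := by
    funext d iv
    exact stepA_eq d iv.2 _
  rw [hb]
  have e2 : List.foldl (fun (pairs : PySem.Dict Int (List String)) (iv : Int × List Int) =>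
        if decide (1 < (iv.2.length : Int)) = true then
          pairs.modify (iv.2.length : Int) [] (fun l => l ++ [(PySem.List.pyGet? K iv.1).getD ""]) else pairs)
        PySem.Dict.empty (PySem.List.enumerate (List.map (fun p => p.2) iter_par))
      = List.foldl (fun (d : PySem.Dict Int (List String)) (kv : String × List Int) =>
          if decide (1 < (kv.2.length : Int)) = true then
            d.modify (kv.2.length : Int) [] (fun l => l ++ [kv.1]) else d)
          PySem.Dict.empty (K.zip (List.map (fun p => p.2) iter_par)) := by
    have h := enum_zip (fun d s val => if decide (1 < (val.length : Int)) = true then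
        d.modify (val.length : Int) [] (fun l => l ++ [s]) else d)
      (List.map (fun p => p.2) iter_par) [] K PySem.Dict.empty (by simp [hK])
    simpa using h
  rw [e2]
  have e3 : K.zip (List.map (fun (p : String × List Int) => p.2) iter_par) = iter_par := by
    rw [hK, List.zip_map']
    simp
  rw [e3]
  set KL := List.map (fun (p : String × List Int) => (p.1, ((p.2.length : Nat) : Int))) iter_par with hKL
  have e4 : List.foldl (fun (d : PySem.Dict Int (List String)) (kv : String × List Int) =>
        if decide (1 < (kv.2.length : Int)) = true then
          d.modify (kv.2.length : Int) [] (fun l => l ++ [kv.1]) else d) PySem.Dict.empty iter_par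
      = List.foldl (fun (d : PySem.Dict Int (List String)) (kl : String × Int) =>
          if decide (1 < kl.2) = true then d.modify kl.2 [] (fun v => v ++ [kl.1]) else d)
          PySem.Dict.empty KL := by
    rw [hKL, List.foldl_map]
  rw [e4]
  have e5 : K.zip lengths = KL := by
    rw [hK, hlen, hKL, List.zip_map']
  rw [e5]
  -- B's fold is the count-filter of A's grouping fold
  refine Eq.trans ?_ (filt_fold (fun L => decide (2 ≤ PySem.List.count lengths L)) KL
    PySem.Dict.empty PySem.Dict.empty (by simp [PySem.Dict.empty]) (by simp [PySem.Dict.empty])).symm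
  set gA := List.foldl (fun (d : PySem.Dict Int (List String)) (kl : String × Int) =>
      if decide (1 < kl.2) = true then d.modify kl.2 [] (fun v => v ++ [kl.1]) else d)
      PySem.Dict.empty KL with hgA
  -- the prune loop body is an erase
  have hb2 : (fun (d : PySem.Dict Int (List String)) (key : Int) =>
        if (d.getD key []).length < 2 then
          match d.pop? key with
          | some (_, d') => d'
          | none => d
        else d)
      = fun d key => if (d.getD key []).length < 2 then d.erase key else d := by
    funext d k
    exact popStep_eq d k
  rw [hb2]
  have hndA : gA.keys.Nodup := by
    rw [hgA, ← List.foldl_filter]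
    exact PySem.Dict.nodup_keys_foldl_modify_key _ Prod.snd [] (fun _ kl v => v ++ [kl.1]) _
      (by simp [PySem.Dict.empty, PySem.Dict.keys])
  rw [prune_filter gA.keys gA hndA]
  -- pointwise: a surviving bucket has ≥ 2 members iff its length occurs ≥ 2 times
  apply List.filter_congr
  intro p hp
  have hmem : p.1 ∈ gA.keys := PySem.Dict.mem_keys_of_mem_items _ hp
  obtain ⟨hgt, hcount⟩ := gA_mem KL p (by rw [← hgA]; exact hp)
  have hlen2 : PySem.List.count lengths p.1 = List.countP (fun kl => kl.2 == p.1) KL := by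
    rw [PySem.List.count_eq, List.count_eq_countP, hlen, hKL, List.countP_map, List.countP_map]
    rfl
  rw [hcount]
  simp only [hmem, decide_true, Bool.true_and, hlen2]
  by_cases h2 : 2 ≤ List.countP (fun kl => kl.2 == p.1) KL
  · simp [h2, Nat.not_lt.mpr h2]
  · simp [h2, Nat.lt_of_not_le h2]
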